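-- pv_equiv track=rewrite | github.com/ION-Emotes/data-NSFW | analyze.py | search_nsfw_keywords
-- ===== SOURCE A (Python) =====
-- nsfw_keywords = [
--     'nsfw', 'sex', 'porn', 'hentai', 'dick', 'penis', 'vagina', 'boobs', 'tits', 'nipple', 'naked', 'nude',
--     'fuck', 'fucking', 'bitch', 'shit', 'ass', 'anal', 'orgasm', 'erotic', 'sexual', 'blowjob', 'handjob',
--     'masturbate', 'masturbation', 'cock', 'pussy', 'cum', 'jizz', 'sperm', 'bdsm', 'fetish', 'dominatrix',
--     'cuck', 'cuckold', 'bdsm', 'spank', 'spanking', 'bondage', 'femdom', 'choke', 'choking', 'slut', 'whore',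
--     'prostitute', 'escort', 'stripper', 'strip', 'horny', 'aroused', 'seduce', 'seduction', 'foreplay', 'tease',
--     'teasing', 'flirt', 'flirting', 'moan', 'moaning', 'grope', 'groping', 'fondle', 'fondling', 'hardcore',
--     'softcore', 'erect', 'erection', 'dildo', 'vibrator', 'sextoy', 'sex toy', 'lube', 'lubricant', 'condom',
--     'protection', 'safe sex', 'unsafe', 'risque', 'lewd', 'sensual', 'passionate', 'love making', 'make love',
--     'kinky', 'kink', 'fetish', 'pervert', 'perverted', 'voyeur', 'exhibitionist', 'swinger', 'orgy', 'threesome',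
--     'gangbang', 'mmf', 'mff', 'dp', 'double penetration', 'swallow', 'deepthroat', 'gag', 'gagging', 'rimjob',
--     'anilingus', 'cunnilingus', 'fellatio', 'squirting', 'golden shower', 'watersports', 'scat', 'pee', 'urine',
--     'defecate', 'defecation', 'coprophilia', 'necrophilia', 'bestiality', 'zoophilia', 'incest', 'taboo'
-- ]
--
-- def search_nsfw_keywords(data):
--     nsfw_entries = []
--     for entry in data:
--         for item in entry:
--             new_name = item.get('newn', '').lower()
--             if any(kw in new_name for kw in nsfw_keywords):
--                 nsfw_entries.append(item['newn'])
--     return nsfw_entries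
-- ===== SOURCE B (Python) =====
-- import re
--
-- # All keywords are metacharacter-free, so a literal alternation pattern matches
-- # exactly the same names as the per-keyword substring test.
-- _NSFW_RE = re.compile('nsfw|sex|porn|hentai|dick|penis|vagina|boobs|tits|nipple|naked|nude|fuck|fucking|bitch|shit|ass|anal|orgasm|erotic|sexual|blowjob|handjob|masturbate|masturbation|cock|pussy|cum|jizz|sperm|bdsm|fetish|dominatrix|cuck|cuckold|bdsm|spank|spanking|bondage|femdom|choke|choking|slut|whore|prostitute|escort|stripper|strip|horny|aroused|seduce|seduction|foreplay|tease|teasing|flirt|flirting|moan|moaning|grope|groping|fondle|fondling|hardcore|softcore|erect|erection|dildo|vibrator|sextoy|sex toy|lube|lubricant|condom|protection|safe sex|unsafe|risque|lewd|sensual|passionate|love making|make love|kinky|kink|fetish|pervert|perverted|voyeur|exhibitionist|swinger|orgy|threesome|gangbang|mmf|mff|dp|double penetration|swallow|deepthroat|gag|gagging|rimjob|anilingus|cunnilingus|fellatio|squirting|golden shower|watersports|scat|pee|urine|defecate|defecation|coprophilia|necrophilia|bestiality|zoophilia|incest|taboo')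
--
--
-- def search_nsfw_keywords(data):
--     return [item['newn']
--             for entry in data
--             for item in entry
--             if _NSFW_RE.search(item.get('newn', '').lower())]
-- ===== Notes on version B (the rewrite author's own statement) =====
-- stated objective: idiomatic
-- what changed: The per-keyword 'any(kw in name)' loop is replaced by one precompiled regex built from a single literal alternation pattern string (searched once per name as a left-to-right automaton pass), and the explicit nested append loops become one list comprehension.
import Mathlib
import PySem

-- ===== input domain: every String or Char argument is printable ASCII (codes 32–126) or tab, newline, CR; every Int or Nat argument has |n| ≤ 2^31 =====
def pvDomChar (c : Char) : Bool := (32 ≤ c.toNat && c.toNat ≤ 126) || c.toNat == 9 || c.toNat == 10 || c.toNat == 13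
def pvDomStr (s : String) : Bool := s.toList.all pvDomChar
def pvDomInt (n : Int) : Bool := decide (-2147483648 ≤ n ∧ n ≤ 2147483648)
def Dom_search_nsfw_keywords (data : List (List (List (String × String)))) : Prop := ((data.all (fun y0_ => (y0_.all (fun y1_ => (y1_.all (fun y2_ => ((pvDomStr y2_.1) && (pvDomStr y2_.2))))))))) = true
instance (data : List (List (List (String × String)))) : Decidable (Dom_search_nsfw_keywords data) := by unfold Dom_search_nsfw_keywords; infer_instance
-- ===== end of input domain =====

-- B replaces the per-keyword substring loop by one precompiled regex built from a single
-- literal alternation pattern (searched once per name), and the nested append loops by one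
-- comprehension (objective: idiomatic; same return value).

-- ===== PORT A =====
def nsfwKeywords : List String := [
    "nsfw", "sex", "porn", "hentai", "dick", "penis", "vagina", "boobs", "tits", "nipple", "naked", "nude",
    "fuck", "fucking", "bitch", "shit", "ass", "anal", "orgasm", "erotic", "sexual", "blowjob", "handjob",
    "masturbate", "masturbation", "cock", "pussy", "cum", "jizz", "sperm", "bdsm", "fetish", "dominatrix",
    "cuck", "cuckold", "bdsm", "spank", "spanking", "bondage", "femdom", "choke", "choking", "slut", "whore",
    "prostitute", "escort", "stripper", "strip", "horny", "aroused", "seduce", "seduction", "foreplay", "tease",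
    "teasing", "flirt", "flirting", "moan", "moaning", "grope", "groping", "fondle", "fondling", "hardcore",
    "softcore", "erect", "erection", "dildo", "vibrator", "sextoy", "sex toy", "lube", "lubricant", "condom",
    "protection", "safe sex", "unsafe", "risque", "lewd", "sensual", "passionate", "love making", "make love",
    "kinky", "kink", "fetish", "pervert", "perverted", "voyeur", "exhibitionist", "swinger", "orgy", "threesome",
    "gangbang", "mmf", "mff", "dp", "double penetration", "swallow", "deepthroat", "gag", "gagging", "rimjob",
    "anilingus", "cunnilingus", "fellatio", "squirting", "golden shower", "watersports", "scat", "pee", "urine",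
    "defecate", "defecation", "coprophilia", "necrophilia", "bestiality", "zoophilia", "incest", "taboo"]

def search_nsfw_keywords (data : List (List (List (String × String)))) : List String :=
  data.foldl (fun nsfwEntries entry =>
    entry.foldl (fun nsfwEntries item =>
      let newName := PySem.Str.lower ((PySem.Dict.mk item).getD "newn" "")
      if nsfwKeywords.any (fun kw => PySem.Str.isIn kw newName) then
        -- item['newn']: the KeyError branch (none) is unreachable, since the guard is false when the key is absent
        nsfwEntries ++ [((PySem.Dict.mk item).get? "newn").getD ""]
      else nsfwEntries) nsfwEntries) []

-- ===== PORT B =====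
-- the literal alternation pattern of Source B (a single string; every branch is metacharacter-free)
def nsfwPattern : String := "nsfw|sex|porn|hentai|dick|penis|vagina|boobs|tits|nipple|naked|nude|fuck|fucking|bitch|shit|ass|anal|orgasm|erotic|sexual|blowjob|handjob|masturbate|masturbation|cock|pussy|cum|jizz|sperm|bdsm|fetish|dominatrix|cuck|cuckold|bdsm|spank|spanking|bondage|femdom|choke|choking|slut|whore|prostitute|escort|stripper|strip|horny|aroused|seduce|seduction|foreplay|tease|teasing|flirt|flirting|moan|moaning|grope|groping|fondle|fondling|hardcore|softcore|erect|erection|dildo|vibrator|sextoy|sex toy|lube|lubricant|condom|protection|safe sex|unsafe|risque|lewd|sensual|passionate|love making|make love|kinky|kink|fetish|pervert|perverted|voyeur|exhibitionist|swinger|orgy|threesome|gangbang|mmf|mff|dp|double penetration|swallow|deepthroat|gag|gagging|rimjob|anilingus|cunnilingus|fellatio|squirting|golden shower|watersports|scat|pee|urine|defecate|defecation|coprophilia|necrophilia|bestiality|zoophilia|incest|taboo"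

-- re.compile splits the alternation into its literal branches
-- '|'.split: split? is none only for an empty separator, unreachable here
def nsfwAlternatives : List String := (PySem.Str.split? nsfwPattern "|").getD []

-- _NSFW_RE.search: one left-to-right pass; at each position, does some branch match there?
def regexSearch (cs : List Char) : Bool :=
  cs.tails.any (fun t => nsfwAlternatives.any (fun kw => kw.toList.isPrefixOf t))

def search_nsfw_keywords_alt (data : List (List (List (String × String)))) : List String :=
  data.flatMap (fun entry =>
    entry.filterMap (fun item =>
      if regexSearch (PySem.Str.lower ((PySem.Dict.mk item).getD "newn" "")).toList then
        some (((PySem.Dict.mk item).get? "newn").getD "")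
      else none))

-- ===== PRECONDITION & SPEC =====
def Spec_search_nsfw_keywords (data : List (List (List (String × String)))) (out : List String) : Prop := out = search_nsfw_keywords_alt data
instance (data : List (List (List (String × String)))) (out : List String) : Decidable (Spec_search_nsfw_keywords data out) := by unfold Spec_search_nsfw_keywords; infer_instance

-- ===== CLAIM (what is proved, stated in full; the proofs are below) =====
def Claim_equal_search_nsfw_keywords : Prop := ∀ (data : List (List (List (String × String)))), Dom_search_nsfw_keywords data → Spec_search_nsfw_keywords data (search_nsfw_keywords data)

-- ===== LEMMAS AND PROOFS =====

-- splitting B's alternation pattern recovers exactly A's keyword list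
set_option maxRecDepth 40000 in
set_option maxHeartbeats 4000000 in
theorem alternatives_eq : nsfwAlternatives = nsfwKeywords := by decide

-- A's keyword-major 'any' equals B's position-major regex scan
theorem anyIsIn_eq_regexSearch (cs : List Char) :
    (nsfwKeywords.any fun kw => PySem.Chars.isIn kw.toList cs) = regexSearch cs := by
  apply Bool.eq_iff_iff.mpr
  simp only [regexSearch, alternatives_eq, List.any_eq_true, PySem.Chars.isIn_iff_infix,
    List.mem_tails, List.isPrefixOf_iff_prefix]
  constructor
  · rintro ⟨kw, hkw, h⟩
    obtain ⟨t, hpre, hsuf⟩ := List.infix_iff_prefix_suffix.mp h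
    exact ⟨t, hsuf, kw, hkw, hpre⟩
  · rintro ⟨t, ht, kw, hkw, hpre⟩
    exact ⟨kw, hkw, List.infix_iff_prefix_suffix.mpr ⟨t, hpre, ht⟩⟩

-- an append-if foldl with guard p equals acc ++ filterMap of the if-some-else-none body with guard q, whenever p = q
theorem foldl_append_if_eq_filterMap {α β : Type} (p q : α → Bool) (f : α → β)
    (hpq : ∀ x, p x = q x) (l : List α) (acc : List β) :
    l.foldl (fun acc x => if p x then acc ++ [f x] else acc) acc
      = acc ++ l.filterMap (fun x => if q x then some (f x) else none) := by
  induction l generalizing acc with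
  | nil => simp
  | cons x rest ih =>
    simp only [List.foldl_cons, List.filterMap_cons]
    rw [hpq x]
    cases hq : q x <;> simp [ih]

-- the whole A loop nest equals acc ++ flatMap of B's per-entry filterMap
theorem outer_eq (data : List (List (List (String × String)))) (acc : List String) :
    data.foldl (fun nsfwEntries entry =>
      entry.foldl (fun nsfwEntries item =>
        let newName := PySem.Str.lower ((PySem.Dict.mk item).getD "newn" "")
        if nsfwKeywords.any (fun kw => PySem.Str.isIn kw newName) then
          nsfwEntries ++ [((PySem.Dict.mk item).get? "newn").getD ""]
        else nsfwEntries) nsfwEntries) acc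
    = acc ++ data.flatMap (fun entry =>
        entry.filterMap (fun item =>
          if regexSearch (PySem.Str.lower ((PySem.Dict.mk item).getD "newn" "")).toList then
            some (((PySem.Dict.mk item).get? "newn").getD "")
          else none)) := by
  have hinner : forall (entry : List (List (String × String))) (acc : List String),
      entry.foldl (fun nsfwEntries item =>
        let newName := PySem.Str.lower ((PySem.Dict.mk item).getD "newn" "")
        if nsfwKeywords.any (fun kw => PySem.Str.isIn kw newName) then
          nsfwEntries ++ [((PySem.Dict.mk item).get? "newn").getD ""]
        else nsfwEntries) acc
      = acc ++ entry.filterMap (fun item =>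
          if regexSearch (PySem.Str.lower ((PySem.Dict.mk item).getD "newn" "")).toList then
            some (((PySem.Dict.mk item).get? "newn").getD "")
          else none) :=
    fun entry acc => foldl_append_if_eq_filterMap _ _ _
      (fun item => by
        simpa [PySem.Str.isIn] using anyIsIn_eq_regexSearch
          (PySem.Str.lower ((PySem.Dict.mk item).getD "newn" "")).toList)
      entry acc
  exact Eq.trans
    (PySem.List.foldl_congr_mem (l := data) _ _ acc (fun acc e _ => hinner e acc))
    (PySem.List.foldl_append_eq_flatMap _ _ _)

-- ===== VERDICT (by name: the statement is the Claim_ definition above) =====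
theorem search_nsfw_keywords_spec : Claim_equal_search_nsfw_keywords := by
  intro data _
  show search_nsfw_keywords data = search_nsfw_keywords_alt data
  unfold search_nsfw_keywords search_nsfw_keywords_alt
  simpa using outer_eq data []
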